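-- pv_equiv track=rewrite | github.com/kiminha983/K-Empowerment-Software-Bootcamp-Python | day05.py | calculate_fee
-- ===== SOURCE A (Python) =====
-- def calculate_fee(args) -> list:
--     """
--     놀이공원 요금 계산 프로그램
--     :param args: ages in list
--     :return: [전체 인원 수, 어른 수, 아이 수, 지불할 총 입장료]
--     """
--     total = 0
--     adults = 0
--     kids = 0
--     for age in args:
--         if 19 <= age:  # adult
--             total = total + 10000
--             adults = adults + 1
--         else:
--             total = total + 3000
--             kids = kids + 1
--     return [len(args), adults, kids, total]
-- ===== SOURCE B (Python) =====
-- def calculate_fee(args) -> list: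
--     """Sort the ages, locate the adult boundary (first age >= 19) by binary
--     search, and derive counts and the total fee arithmetically."""
--     s = sorted(args)
--     lo, hi = 0, len(s)
--     while lo < hi:
--         mid = (lo + hi) // 2
--         if s[mid] < 19:
--             lo = mid + 1
--         else:
--             hi = mid
--     kids = lo
--     adults = len(s) - kids
--     return [len(args), adults, kids, adults * 10000 + kids * 3000]
-- ===== Notes on version B (the rewrite author's own statement) =====
-- stated objective: alternative
-- what changed: Instead of a three-accumulator branching loop, B sorts the ages and finds the kid/adult boundary with a hand-written binary search (kids = index of first age >= 19 in the sorted list), then derives adults and the total fee by closed-form arithmetic.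
import Mathlib
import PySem

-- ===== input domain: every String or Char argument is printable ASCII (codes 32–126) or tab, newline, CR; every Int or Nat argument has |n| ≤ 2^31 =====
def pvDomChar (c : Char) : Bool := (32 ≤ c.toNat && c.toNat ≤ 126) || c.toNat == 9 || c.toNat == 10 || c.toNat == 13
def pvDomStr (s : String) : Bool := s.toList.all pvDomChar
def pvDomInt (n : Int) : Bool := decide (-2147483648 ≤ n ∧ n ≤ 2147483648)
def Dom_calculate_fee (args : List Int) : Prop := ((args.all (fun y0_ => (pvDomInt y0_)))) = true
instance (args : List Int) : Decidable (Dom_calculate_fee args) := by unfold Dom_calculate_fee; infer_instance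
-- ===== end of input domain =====

-- B replaces A's three-accumulator branching loop by sort + hand-written binary search for the
-- kid/adult boundary, deriving counts and the total fee by closed-form arithmetic (alternative algorithm).


-- ===== PORT A =====
def calculate_fee (args : List Int) : List Int :=
  let st := args.foldl (fun (s : Int × Int × Int) age =>
    if 19 ≤ age then (s.1 + 10000, s.2.1 + 1, s.2.2)
    else (s.1 + 3000, s.2.1, s.2.2 + 1)) (0, 0, 0)
  [(args.length : Int), st.2.1, st.2.2, st.1]

-- ===== PORT B =====
-- the while-loop of Source B; s[mid] is always in range when read (lo < hi ≤ len s), so getD is exact here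
def pvBisect (s : List Int) (lo hi : Nat) : Nat :=
  if lo < hi then
    let mid := (lo + hi) / 2
    if s.getD mid 0 < 19 then pvBisect s (mid + 1) hi else pvBisect s lo mid
  else lo
termination_by hi - lo
decreasing_by all_goals omega

def calculate_fee_alt (args : List Int) : List Int :=
  let s := PySem.List.sorted args (fun x => x) false
  let kids : Nat := pvBisect s 0 s.length
  let adults : Int := (s.length : Int) - (kids : Int)
  [(args.length : Int), adults, (kids : Int), adults * 10000 + (kids : Int) * 3000]

-- ===== PRECONDITION & SPEC =====
def Spec_calculate_fee (args : List Int) (out : List Int) : Prop := out = calculate_fee_alt args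
instance (args : List Int) (out : List Int) : Decidable (Spec_calculate_fee args out) := by unfold Spec_calculate_fee; infer_instance

-- ===== CLAIM (what is proved, stated in full; the proofs are below) =====
def Claim_equal_calculate_fee : Prop := ∀ (args : List Int), Dom_calculate_fee args → Spec_calculate_fee args (calculate_fee args)

-- ===== LEMMAS AND PROOFS =====

-- A's fold computes (total, adults, kids) in closed form
lemma fee_fold (args : List Int) (t a k : Int) :
    args.foldl (fun (s : Int × Int × Int) age =>
      if 19 ≤ age then (s.1 + 10000, s.2.1 + 1, s.2.2)
      else (s.1 + 3000, s.2.1, s.2.2 + 1)) (t, a, k) =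
    (t + ((args.filter (fun age => 19 ≤ age)).length : Int) * 10000
        + ((args.length : Int) - (args.filter (fun age => 19 ≤ age)).length) * 3000,
     a + ((args.filter (fun age => 19 ≤ age)).length : Int),
     k + ((args.length : Int) - (args.filter (fun age => 19 ≤ age)).length)) := by
  induction args generalizing t a k with
  | nil => simp
  | cons x xs ih =>
    simp only [List.foldl_cons, List.length_cons]
    by_cases h : 19 ≤ x
    · rw [if_pos h, ih]
      refine Prod.ext ?_ (Prod.ext ?_ ?_) <;> simp [h] <;> ring
    · rw [if_neg h, ih]
      refine Prod.ext ?_ (Prod.ext ?_ ?_) <;> simp [h] <;> ring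

-- in a sorted list the elements < 19 form a prefix of length countP (· < 19)
lemma sorted_prefix (s : List Int) (hs : s.Pairwise (· ≤ ·)) :
    ∀ i, i < s.length → ((s.getD i 0 < 19) ↔ i < s.countP (fun x => decide (x < 19))) := by
  induction s with
  | nil => intro i hi; simp at hi
  | cons x t ih =>
    rcases List.pairwise_cons.mp hs with ⟨hx, ht⟩
    intro i hi
    by_cases hx19 : x < 19
    · have hc : (x :: t).countP (fun x => decide (x < 19)) = t.countP (fun x => decide (x < 19)) + 1 := by
        simp [hx19]
      cases i with
      | zero => simp [hc, hx19]
      | succ j =>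
        have hj : j < t.length := by simpa using hi
        have := ih ht j hj
        simpa [hc, List.getD_cons_succ] using this
    · have hz : (x :: t).countP (fun x => decide (x < 19)) = 0 := by
        rw [List.countP_eq_zero]
        intro a ha
        rcases List.mem_cons.mp ha with rfl | hat
        · simpa using hx19
        · have := hx a hat; simp; omega
      rw [hz]
      simp only [Nat.not_lt_zero, iff_false]
      cases i with
      | zero => simpa using hx19
      | succ j =>
        have hj : j < t.length := by simpa using hi
        rw [List.getD_cons_succ]
        have hmem : t.getD j 0 ∈ t := by
          rw [List.getD_eq_getElem?_getD, List.getElem?_eq_getElem hj]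
          exact List.getElem_mem hj
        have := hx _ hmem
        omega

-- the binary search converges to any point c whose left side is exactly the (< 19)-prefix
lemma pvBisect_eq (n : Nat) : ∀ (s : List Int) (c lo hi : Nat),
    hi - lo ≤ n →
    (∀ i, i < s.length → ((s.getD i 0 < 19) ↔ i < c)) →
    lo ≤ c → c ≤ hi → hi ≤ s.length → pvBisect s lo hi = c := by
  induction n with
  | zero =>
    intro s c lo hi hn hpre hlo hhi hlen
    rw [pvBisect]
    have : ¬ lo < hi := by omega
    simp [this]; omega
  | succ m ih =>
    intro s c lo hi hn hpre hlo hhi hlen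
    rw [pvBisect]
    by_cases hlt : lo < hi
    · simp only [hlt, if_true]
      have hmid1 : lo ≤ (lo + hi) / 2 := by omega
      have hmid2 : (lo + hi) / 2 < hi := by omega
      have hmlen : (lo + hi) / 2 < s.length := by omega
      by_cases hv : s.getD ((lo + hi) / 2) 0 < 19
      · simp only [hv, if_true]
        have hc : (lo + hi) / 2 < c := (hpre _ hmlen).mp hv
        exact ih s c _ hi (by omega) hpre (by omega) hhi hlen
      · simp only [hv, if_false]
        have hc : ¬ ((lo + hi) / 2 < c) := fun h => hv ((hpre _ hmlen).mpr h)
        exact ih s c lo _ (by omega) hpre hlo (by omega) (by omega)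
    · simp [hlt]; omega

-- elements below 19 and the filtered adults partition the list
lemma count_split (l : List Int) :
    l.countP (fun x => decide (x < 19)) + l.countP (fun age => decide (19 ≤ age)) = l.length := by
  induction l with
  | nil => simp
  | cons x t ih =>
    simp only [List.countP_cons, List.length_cons]
    by_cases h : 19 ≤ x
    · have h2 : ¬ (x < 19) := by omega
      simp [h, h2]; omega
    · have h2 : x < 19 := by omega
      simp [h, h2]; omega

theorem calculate_fee_spec : Claim_equal_calculate_fee := by
  intro args _
  unfold Spec_calculate_fee calculate_fee calculate_fee_alt
  simp only [fee_fold]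
  set s := PySem.List.sorted args (fun x => x) false with hs
  have hperm : s.Perm args := PySem.List.sorted_perm args (fun x => x) false
  have hpw : s.Pairwise (· ≤ ·) := by
    have := PySem.List.sorted_pairwise args (fun x => x)
    simpa using this
  have hlen : s.length = args.length := hperm.length_eq
  -- the binary search finds countP (· < 19)
  have hcle : s.countP (fun x => decide (x < 19)) ≤ s.length := List.countP_le_length
  have hb : pvBisect s 0 s.length = s.countP (fun x => decide (x < 19)) :=
    pvBisect_eq s.length s _ 0 s.length (by omega) (sorted_prefix s hpw)
      (Nat.zero_le _) hcle le_rfl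
  -- relate countP (< 19) to A's filter count of (19 ≤ ·)
  have hcount : s.countP (fun x => decide (x < 19)) = args.countP (fun x => decide (x < 19)) :=
    hperm.countP_eq _
  have hsplit : args.countP (fun x => decide (x < 19))
      + (args.filter (fun age => decide (19 ≤ age))).length = args.length := by
    rw [← List.countP_eq_length_filter]; exact count_split args
  have hb2 : pvBisect s 0 args.length = args.countP (fun x => decide (x < 19)) := by
    rw [← hlen, hb, hcount]
  simp only [hlen, hb2]
  refine List.ext_getElem (by simp) ?_
  intro i h1 h2
  simp only [List.length_cons, List.length_nil] at h1
  interval_cases i <;> simp <;> omega
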